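-- pv_equiv track=rewrite | github.com/questionsun/New-Start | cal_24_v2.0.0.py | all_num
-- ===== SOURCE A (Python) =====
-- def all_num(var1,var2,var3,var4):
--     num = [var1,var2,var3,var4]
--     number_all = []
--     for i in range(4):
--         num_tmp1 = num.copy()
--         num1 = num_tmp1[i]
--         del num_tmp1[i]
--         for j in range(3):
--             num_tmp2 = num_tmp1.copy()
--             num2 = num_tmp2[j]
--             del num_tmp2[j]
--             for k in range(2):
--                 num_tmp3 = num_tmp2.copy()
--                 num3 = num_tmp3[k]
--                 del num_tmp3[k]
--                 for l in range(1):
--                     num_tmp4 = num_tmp3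
--                     num4 = num_tmp4[l]
--                     number_all.append([num1,num2,num3,num4])
--     return number_all
-- ===== SOURCE B (Python) =====
-- def all_num(var1, var2, var3, var4):
--     number_all = []
--
--     def perm(remaining, acc):
--         if not remaining:
--             number_all.append(acc)
--             return
--         for idx in range(len(remaining)):
--             perm(remaining[:idx] + remaining[idx+1:], acc + [remaining[idx]])
--
--     perm([var1, var2, var3, var4], [])
--     return number_all
-- ===== Notes on version B (the rewrite author's own statement) =====
-- stated objective: simpler
-- what changed: Replaces A's three hand-unrolled nested index loops with copy/del bookkeeping by a single recursive helper that selects each element in ascending index order from a shrinking remainder list, producing the identical 24-permutation order.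
import Mathlib
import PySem

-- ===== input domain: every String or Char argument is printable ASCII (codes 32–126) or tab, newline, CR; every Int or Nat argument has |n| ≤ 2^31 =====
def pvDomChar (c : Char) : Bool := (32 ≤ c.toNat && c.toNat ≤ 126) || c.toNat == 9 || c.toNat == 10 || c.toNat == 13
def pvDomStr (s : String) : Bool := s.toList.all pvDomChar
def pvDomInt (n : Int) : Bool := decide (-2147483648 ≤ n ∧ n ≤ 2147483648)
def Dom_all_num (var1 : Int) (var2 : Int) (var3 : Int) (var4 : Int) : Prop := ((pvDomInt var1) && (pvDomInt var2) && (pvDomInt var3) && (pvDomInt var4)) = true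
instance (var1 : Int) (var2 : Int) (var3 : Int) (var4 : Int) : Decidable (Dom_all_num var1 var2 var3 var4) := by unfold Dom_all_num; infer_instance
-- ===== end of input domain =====

-- B replaces A's three hand-unrolled nested index loops by one recursive selection over a
-- shrinking remainder list (objective: simpler); same 24-permutation output in the same order.

-- ===== PORT A =====
-- Literal port of A's four nested `for i in range(...)` loops; `xs[i]` with the in-range
-- literal index is ported as (pyGet? xs i).getD 0 (the index is always in range, so getD is
-- never taken on `none`), and `del xs[i]` as eraseIdx.
def all_num (var1 : Int) (var2 : Int) (var3 : Int) (var4 : Int) : List (List Int) :=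
  let num : List Int := [var1, var2, var3, var4]
  (PySem.List.pyRange 0 4 1).foldl (fun number_all i =>
    let num_tmp1 := num
    let num1 := (PySem.List.pyGet? num_tmp1 i).getD 0
    let num_tmp1 := num_tmp1.eraseIdx i.toNat
    (PySem.List.pyRange 0 3 1).foldl (fun number_all j =>
      let num_tmp2 := num_tmp1
      let num2 := (PySem.List.pyGet? num_tmp2 j).getD 0
      let num_tmp2 := num_tmp2.eraseIdx j.toNat
      (PySem.List.pyRange 0 2 1).foldl (fun number_all k =>
        let num_tmp3 := num_tmp2
        let num3 := (PySem.List.pyGet? num_tmp3 k).getD 0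
        let num_tmp3 := num_tmp3.eraseIdx k.toNat
        (PySem.List.pyRange 0 1 1).foldl (fun number_all l =>
          let num_tmp4 := num_tmp3
          let num4 := (PySem.List.pyGet? num_tmp4 l).getD 0
          number_all ++ [[num1, num2, num3, num4]]) number_all) number_all) number_all) []

-- ===== PORT B =====
-- Port of Source B's recursive helper perm(remaining, acc); `range(len(remaining))` is
-- List.range remaining.length (exact: nonnegative bound), `remaining[:idx]+remaining[idx+1:]`
-- is take idx ++ drop (idx+1) (exact for 0 ≤ idx < len), `remaining[idx]` as pyGet?+getD
-- (index always in range). Python's shared `number_all` accumulator becomes the returned list.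
def pvPerm (remaining : List Int) (acc : List Int) : List (List Int) :=
  if h : remaining = [] then [acc]
  else
    (List.range remaining.length).attach.foldl
      (fun res idx =>
        res ++ pvPerm (remaining.take idx.1 ++ remaining.drop (idx.1 + 1))
                      (acc ++ [(PySem.List.pyGet? remaining (idx.1 : Int)).getD 0]))
      []
termination_by remaining.length
decreasing_by
  have hidx : idx.1 < remaining.length := List.mem_range.mp idx.2
  have : remaining.length ≠ 0 := fun h0 => h (List.eq_nil_of_length_eq_zero h0)
  simp [List.length_take, List.length_drop]
  omega

def all_num_alt (var1 : Int) (var2 : Int) (var3 : Int) (var4 : Int) : List (List Int) :=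
  pvPerm [var1, var2, var3, var4] []

-- ===== PRECONDITION & SPEC =====
def Spec_all_num (var1 : Int) (var2 : Int) (var3 : Int) (var4 : Int) (out : List (List Int)) : Prop := out = all_num_alt var1 var2 var3 var4
instance (var1 : Int) (var2 : Int) (var3 : Int) (var4 : Int) (out : List (List Int)) : Decidable (Spec_all_num var1 var2 var3 var4 out) := by unfold Spec_all_num; infer_instance

-- ===== CLAIM (what is proved, stated in full; the proofs are below) =====
def Claim_equal_all_num : Prop := ∀ (var1 : Int) (var2 : Int) (var3 : Int) (var4 : Int), Dom_all_num var1 var2 var3 var4 → Spec_all_num var1 var2 var3 var4 (all_num var1 var2 var3 var4)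

-- ===== LEMMAS AND PROOFS =====

theorem pvPerm_nil (acc : List Int) : pvPerm [] acc = [acc] := by
  rw [pvPerm]; simp

theorem pvPerm_one (a : Int) (acc : List Int) : pvPerm [a] acc = [acc ++ [a]] := by
  rw [pvPerm]
  simp [List.range_succ, List.attach, List.attachWith, List.pmap,
        PySem.List.pyGet?, PySem.List.pyIdx?, pvPerm_nil]

theorem pvPerm_two (a b : Int) (acc : List Int) :
    pvPerm [a, b] acc = [acc ++ [a, b], acc ++ [b, a]] := by
  rw [pvPerm]
  simp [List.range_succ, List.attach, List.attachWith, List.pmap,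
        PySem.List.pyGet?, PySem.List.pyIdx?, pvPerm_one]

theorem pvPerm_three (a b c : Int) (acc : List Int) :
    pvPerm [a, b, c] acc =
      [acc ++ [a, b, c], acc ++ [a, c, b], acc ++ [b, a, c],
       acc ++ [b, c, a], acc ++ [c, a, b], acc ++ [c, b, a]] := by
  rw [pvPerm]
  simp [List.range_succ, List.attach, List.attachWith, List.pmap,
        PySem.List.pyGet?, PySem.List.pyIdx?, pvPerm_two]

theorem pvPerm_four (a b c d : Int) (acc : List Int) :
    pvPerm [a, b, c, d] acc =
      [acc ++ [a, b, c, d], acc ++ [a, b, d, c], acc ++ [a, c, b, d],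
       acc ++ [a, c, d, b], acc ++ [a, d, b, c], acc ++ [a, d, c, b],
       acc ++ [b, a, c, d], acc ++ [b, a, d, c], acc ++ [b, c, a, d],
       acc ++ [b, c, d, a], acc ++ [b, d, a, c], acc ++ [b, d, c, a],
       acc ++ [c, a, b, d], acc ++ [c, a, d, b], acc ++ [c, b, a, d],
       acc ++ [c, b, d, a], acc ++ [c, d, a, b], acc ++ [c, d, b, a],
       acc ++ [d, a, b, c], acc ++ [d, a, c, b], acc ++ [d, b, a, c],
       acc ++ [d, b, c, a], acc ++ [d, c, a, b], acc ++ [d, c, b, a]] := by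
  rw [pvPerm]
  simp [List.range_succ, List.attach, List.attachWith, List.pmap,
        PySem.List.pyGet?, PySem.List.pyIdx?, pvPerm_three]

-- ===== VERDICT (by name: the statement is the Claim_ definition above) =====
set_option maxHeartbeats 1000000 in
theorem all_num_spec : Claim_equal_all_num := by
  intro v1 v2 v3 v4 _
  show _ = _
  rw [all_num_alt, pvPerm_four]
  simp [all_num, PySem.List.pyRange, PySem.List.pyGet?, PySem.List.pyIdx?, List.range_succ]
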